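-- pv_equiv track=rewrite | github.com/ayushman-j/Cryptanalysis-of-Monoalphabetic-Cipher-using-SAT-Solver | cnf_solver_driver.py | build_token_candidates
-- ===== SOURCE A (Python) =====
-- MAX_CANDIDATES_PER_TOKEN = 8   # per token (short word), top-K matched words
--
-- def token_pattern(word):
--     # produce pattern like ABCA for word "NOON" -> 0 1 2 2? but we want letter-equality pattern
--     # We'll produce pattern with numbers: first new letter gets next number
--     mapping = {}
--     pat = []
--     next_id = 0
--     for ch in word:
--         if ch not in mapping:
--             mapping[ch] = next_id
--             next_id += 1
--         pat.append(mapping[ch])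
--     return tuple(pat)
--
-- def word_matches_pattern(cipher_word, candidate):
--     # both uppercase; require same length and pattern shape
--     if len(cipher_word) != len(candidate):
--         return False
--     return token_pattern(cipher_word) == token_pattern(candidate)
--
-- def build_token_candidates(cipher_tokens, wordlist, top_k=MAX_CANDIDATES_PER_TOKEN):
--     """
--     For each token of length 1..4 in the ciphertext, find candidate English words
--     with same pattern shape from wordlist. Return dict token->list(candidates)
--     """
--     token_candidates = {}
--     for idx, tk in enumerate(cipher_tokens):
--         t = tk.strip()
--         if len(t) == 0:
--             continue
--         if not all(ch.isalpha() for ch in t):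
--             continue
--         if len(t) > 12:
--             continue
--         # Consider only tokens length up to 6 or 4 (configurable)
--         if len(t) <= 6:
--             # find matching candidate words by same pattern
--             candidates = []
--             for w in wordlist:
--                 if len(w) != len(t):
--                     continue
--                 if word_matches_pattern(t, w):
--                     candidates.append(w)
--             # For 1-letter words, keep A and I priority
--             if len(t) == 1:
--                 if 'A' in candidates: candidates.remove('A'); candidates.insert(0, 'A')
--                 if 'I' in candidates and 'I' not in candidates[:2]: candidates.insert(0, 'I')
--             token_candidates[(idx, t)] = candidates[:top_k]
--     return token_candidates
-- ===== SOURCE B (Python) =====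
-- MAX_CANDIDATES_PER_TOKEN = 8
--
--
-- def _pattern(word):
--     first = {}
--     for ch in word:
--         if ch not in first:
--             first[ch] = len(first)
--     return tuple(first[ch] for ch in word)
--
--
-- def _prioritized(cands):
--     if 'A' in cands:
--         i = cands.index('A')
--         cands = ['A'] + cands[:i] + cands[i + 1:]
--     if 'I' in cands and 'I' not in cands[:2]:
--         cands = ['I'] + cands
--     return cands
--
--
-- def build_token_candidates(cipher_tokens, wordlist, top_k=MAX_CANDIDATES_PER_TOKEN):
--     # Index the wordlist once by letter-equality pattern (the pattern's length is the
--     # word's length, so the pattern alone is the key), then answer each token by one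
--     # dict lookup; the result dict is a comprehension over the validated tokens.
--     index = {}
--     for w in wordlist:
--         index.setdefault(_pattern(w), []).append(w)
--
--     def candidates(t):
--         c = index.get(_pattern(t), [])
--         if len(t) == 1:
--             c = _prioritized(c)
--         return c[:top_k]
--
--     return {
--         (i, t): candidates(t)
--         for i, t in ((i, tk.strip()) for i, tk in enumerate(cipher_tokens))
--         if t.isalpha() and len(t) <= 6
--     }
-- ===== Notes on version B (the rewrite author's own statement) =====
-- stated objective: faster
-- what changed: B indexes the wordlist once by letter-equality pattern (the pattern alone is the key, since it determines the length) and builds the result as a comprehension over validated tokens with one dict lookup each, instead of A's rescan of the whole wordlist (recomputing every word's pattern) for every token; B's pattern helper is two-stage (build first-occurrence dict, then map) and its 1-letter fix-up uses index+slices instead of remove+insert.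
import Mathlib
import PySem

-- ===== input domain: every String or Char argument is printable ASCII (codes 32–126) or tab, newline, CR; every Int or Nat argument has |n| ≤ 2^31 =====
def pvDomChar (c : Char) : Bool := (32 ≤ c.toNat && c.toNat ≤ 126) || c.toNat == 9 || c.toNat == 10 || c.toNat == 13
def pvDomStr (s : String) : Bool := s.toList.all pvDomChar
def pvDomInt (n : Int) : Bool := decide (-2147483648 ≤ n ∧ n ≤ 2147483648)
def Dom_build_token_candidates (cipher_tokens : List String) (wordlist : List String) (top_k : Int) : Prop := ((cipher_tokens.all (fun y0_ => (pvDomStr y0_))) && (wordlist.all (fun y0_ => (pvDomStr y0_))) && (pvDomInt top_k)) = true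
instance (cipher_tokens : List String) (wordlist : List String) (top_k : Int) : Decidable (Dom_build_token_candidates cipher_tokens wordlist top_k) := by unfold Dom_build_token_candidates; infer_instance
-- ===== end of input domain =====

-- B replaces A's per-token scan of the whole wordlist (recomputing every word's pattern per
-- token) by one indexing pass over the wordlist keyed by letter-equality pattern, then a
-- single dict lookup per token; objective: faster.
-- Both Pythons return a dict keyed by (idx, t); idx strictly increases so keys are distinct
-- and the dict is ported as the association list built in insertion order.

-- ===== PORT A =====
def token_pattern (word : String) : List Int :=
  (word.toList.foldl (fun (s : PySem.Dict Char Int × List Int × Int) ch =>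
      match s with
      | (m, pat, nid) =>
        if m.contains ch then (m, pat ++ [m.getD ch 0], nid)
        else (m.insert ch nid, pat ++ [nid], nid + 1))
    (PySem.Dict.empty, [], 0)).2.1

def word_matches_pattern (cipher_word candidate : String) : Bool :=
  if PySem.Str.len cipher_word ≠ PySem.Str.len candidate then false
  else token_pattern cipher_word == token_pattern candidate

-- A's 1-letter 'A'/'I' priority fix-up: 'candidates.remove("A"); candidates.insert(0,"A")'
def pvAdjustOne (c : List String) : List String :=
  let c1 := if c.contains "A" then "A" :: ((PySem.List.remove? c "A").getD c) else c
  if c1.contains "I" && !((PySem.List.slice c1 none (some 2)).contains "I") then "I" :: c1 else c1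

def build_token_candidates (cipher_tokens : List String) (wordlist : List String) (top_k : Int) : List (Int × String × List String) :=
  (PySem.List.enumerate cipher_tokens).foldl (fun acc p =>
    let t := PySem.Str.strip p.2
    if PySem.Str.len t == 0 then acc
    else if !(t.toList.all (fun ch => PySem.Chars.isalpha ch)) then acc
    else if PySem.Str.len t > 12 then acc
    else if PySem.Str.len t ≤ 6 then
      let candidates := wordlist.foldl (fun cs w =>
        if PySem.Str.len w ≠ PySem.Str.len t then cs
        else if word_matches_pattern t w then cs ++ [w] else cs) []
      let candidates := if PySem.Str.len t == 1 then pvAdjustOne candidates else candidates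
      acc ++ [(p.1, t, PySem.List.slice candidates none (some top_k))]
    else acc) []

-- ===== PORT B =====
-- B's _pattern: build the first-occurrence dict once, then map the word through it
def pvFirstMap (l : List Char) : PySem.Dict Char Int :=
  l.foldl (fun d ch => if d.contains ch then d else d.insert ch (d.size : Int)) PySem.Dict.empty

def pvPattern (word : String) : List Int :=
  word.toList.map (fun ch => (pvFirstMap word.toList).getD ch 0)

-- B's _prioritized: 'i = cands.index("A"); cands = ["A"] + cands[:i] + cands[i+1:]'
def pvPrioritized (c : List String) : List String :=
  let c1 := if c.contains "A" then
      match PySem.List.index? c "A" with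
      | some i => "A" :: (PySem.List.slice c none (some (i : Int)) ++ PySem.List.slice c (some ((i : Int) + 1)) none)
      | none => c
    else c
  if c1.contains "I" && !((PySem.List.slice c1 none (some 2)).contains "I") then "I" :: c1 else c1

-- B's candidates(t): one lookup in the prebuilt index
def pvCandidates (index : PySem.Dict (List Int) (List String)) (top_k : Int) (t : String) : List String :=
  let c := index.getD (pvPattern t) []
  let c := if PySem.Str.len t == 1 then pvPrioritized c else c
  PySem.List.slice c none (some top_k)

def build_token_candidates_alt (cipher_tokens : List String) (wordlist : List String) (top_k : Int) : List (Int × String × List String) :=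
  let index := wordlist.foldl (fun d w => d.modify (pvPattern w) [] (fun l => l ++ [w])) PySem.Dict.empty
  (PySem.List.enumerate cipher_tokens).filterMap (fun p =>
    let t := PySem.Str.strip p.2
    if PySem.Str.strIsalpha t = true ∧ PySem.Str.len t ≤ 6 then
      some (p.1, t, pvCandidates index top_k t)
    else none)

-- ===== PRECONDITION & SPEC =====
def Spec_build_token_candidates (cipher_tokens : List String) (wordlist : List String) (top_k : Int) (out : List (Int × String × List String)) : Prop := out = build_token_candidates_alt cipher_tokens wordlist top_k
instance (cipher_tokens : List String) (wordlist : List String) (top_k : Int) (out : List (Int × String × List String)) : Decidable (Spec_build_token_candidates cipher_tokens wordlist top_k out) := by unfold Spec_build_token_candidates; infer_instance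

-- ===== CLAIM (what is proved, stated in full; the proofs are below) =====
def Claim_equal_build_token_candidates : Prop := ∀ (cipher_tokens : List String) (wordlist : List String) (top_k : Int), Dom_build_token_candidates cipher_tokens wordlist top_k → Spec_build_token_candidates cipher_tokens wordlist top_k (build_token_candidates cipher_tokens wordlist top_k)

-- ===== LEMMAS AND PROOFS =====

-- B's index-building fold leaves an existing key's binding untouched
lemma pvFold_pres (l : List Char) (d : PySem.Dict Char Int) (ch : Char) (h : d.contains ch = true) :
    (l.foldl (fun d ch => if d.contains ch then d else d.insert ch (d.size : Int)) d).contains ch = true ∧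
    (l.foldl (fun d ch => if d.contains ch then d else d.insert ch (d.size : Int)) d).getD ch 0 = d.getD ch 0 := by
  induction l generalizing d with
  | nil => exact ⟨h, rfl⟩
  | cons a l ih =>
    simp only [List.foldl_cons]
    by_cases hc : d.contains a = true
    · rw [if_pos hc]; exact ih d h
    · rw [if_neg hc]
      have hne : ch ≠ a := fun he => hc (he ▸ h)
      have h' : (d.insert a (d.size : Int)).contains ch = true := by
        rw [PySem.Dict.contains_insert]; simp [h]
      obtain ⟨h1, h2⟩ := ih (d.insert a (d.size : Int)) h'
      exact ⟨h1, h2.trans (PySem.Dict.getD_insert_of_ne d _ 0 hne)⟩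

-- A's one-pass pattern loop computes what B's two-stage _pattern computes
lemma pvPatA_general (l : List Char) (m : PySem.Dict Char Int) (pat : List Int) (nid : Int)
    (hn : nid = (m.size : Int)) :
    (l.foldl (fun (s : PySem.Dict Char Int × List Int × Int) ch =>
        match s with
        | (m, pat, nid) =>
          if m.contains ch then (m, pat ++ [m.getD ch 0], nid)
          else (m.insert ch nid, pat ++ [nid], nid + 1)) (m, pat, nid)).2.1
      = pat ++ l.map (fun ch =>
          (l.foldl (fun d ch => if d.contains ch then d else d.insert ch (d.size : Int)) m).getD ch 0) := by
  induction l generalizing m pat nid with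
  | nil => simp
  | cons a l ih =>
    subst hn
    simp only [List.foldl_cons, List.map_cons]
    by_cases hc : m.contains a = true
    · rw [if_pos hc, if_pos hc, ih m (pat ++ [m.getD a 0]) _ rfl]
      rw [(pvFold_pres l m a hc).2]
      simp
    · rw [if_neg hc, if_neg hc]
      have hsz : (m.size : Int) + 1 = ((m.insert a (m.size : Int)).size : Int) := by
        rw [PySem.Dict.size_insert, if_neg hc]; push_cast; ring
      rw [ih (m.insert a (m.size : Int)) (pat ++ [(m.size : Int)]) _ hsz]
      have hcontains : (m.insert a (m.size : Int)).contains a = true := by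
        rw [PySem.Dict.contains_insert]; simp
      have hv : (l.foldl (fun d ch => if d.contains ch then d else d.insert ch (d.size : Int))
          (m.insert a (m.size : Int))).getD a 0 = (m.size : Int) := by
        rw [(pvFold_pres l (m.insert a (m.size : Int)) a hcontains).2, PySem.Dict.getD_insert_self]
      rw [hv]; simp

lemma pvPat_eq (w : String) : token_pattern w = pvPattern w := by
  unfold token_pattern pvPattern pvFirstMap
  rw [pvPatA_general w.toList PySem.Dict.empty [] 0 rfl]
  simp

lemma pvPat_len (w : String) : (pvPattern w).length = w.toList.length := by
  unfold pvPattern; simp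

-- the (length, pattern) key A's inner scan effectively filters by
def pvKey (w : String) : Int × List Int := (PySem.Str.len w, token_pattern w)

-- A's inner scan computes exactly the words whose key matches the token's key
lemma pvCandA_eq (t : String) (ws : List String) :
    ws.foldl (fun cs w =>
        if PySem.Str.len w ≠ PySem.Str.len t then cs
        else if word_matches_pattern t w then cs ++ [w] else cs) []
      = ws.filter (fun w => pvKey w == pvKey t) := by
  have hstep : ∀ (cs : List String) (w : String),
      (if PySem.Str.len w ≠ PySem.Str.len t then cs
       else if word_matches_pattern t w then cs ++ [w] else cs)
      = (if pvKey w == pvKey t then cs ++ [w] else cs) := by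
    intro cs w
    by_cases hl : PySem.Str.len w = PySem.Str.len t
    · rw [if_neg (not_not_intro hl)]
      have hw : word_matches_pattern t w = (token_pattern t == token_pattern w) := by
        unfold word_matches_pattern
        rw [if_neg (not_not_intro hl.symm)]
      have hk : (pvKey w == pvKey t) = (token_pattern t == token_pattern w) := by
        rw [Bool.eq_iff_iff]
        simp only [beq_iff_eq, pvKey, Prod.mk.injEq]
        constructor
        · rintro ⟨-, h⟩; exact h.symm
        · intro h; exact ⟨hl, h.symm⟩
      rw [hw, hk]
    · have hne : ¬ (pvKey w == pvKey t) = true := by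
        simp only [beq_iff_eq]
        intro h
        exact hl (congrArg Prod.fst h)
      rw [if_pos hl, if_neg hne]
  rw [PySem.List.foldl_congr_mem _ _ (fun cs w => if pvKey w == pvKey t then cs ++ [w] else cs) _
      (fun cs w _ => hstep cs w)]
  simpa using PySem.List.foldl_append_if_eq_filter (fun w => pvKey w == pvKey t) ws []

-- pattern equality alone already forces equal lengths, so the key collapses to the pattern
lemma pvFilter_key (t : String) (ws : List String) :
    ws.filter (fun w => pvKey w == pvKey t) = ws.filter (fun w => pvPattern w == pvPattern t) := by
  apply List.filter_congr
  intro w _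
  have hlen : pvPattern w = pvPattern t → PySem.Str.len w = PySem.Str.len t := by
    intro h
    rw [PySem.Str.len_eq, PySem.Str.len_eq, ← pvPat_len, ← pvPat_len, h]
  by_cases hp : pvPattern w = pvPattern t
  · have hkey : pvKey w = pvKey t := by
      unfold pvKey
      rw [pvPat_eq w, pvPat_eq t, hp, hlen hp]
    simp [hkey, hp]
  · have hkey : pvKey w ≠ pvKey t := by
      intro h
      exact hp (by rw [← pvPat_eq w, ← pvPat_eq t]; exact congrArg Prod.snd h)
    rw [Bool.eq_iff_iff]
    simp [hkey, hp]

-- looking up the token's pattern in B's index yields exactly the matching words in order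
lemma pvIndex_getD (ws : List String) (t : String) :
    (ws.foldl (fun d w => d.modify (pvPattern w) [] (fun l => l ++ [w])) PySem.Dict.empty).getD (pvPattern t) []
      = ws.filter (fun w => pvPattern w == pvPattern t) := by
  have h : ws.foldl (fun d w => d.modify (pvPattern w) [] (fun l => l ++ [w])) PySem.Dict.empty
      = (ws.map (fun w => (pvPattern w, w))).foldl
          (fun d p => d.modify p.1 [] (fun l => l ++ [p.2])) PySem.Dict.empty := by
    rw [List.foldl_map]
  rw [h, PySem.Dict.getD_foldl_modify_append, List.filter_map, List.map_map]
  simp [Function.comp_def]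

-- the 'A'/'I' fix-ups agree: remove-first+prepend = index+slice surgery
lemma pvAdjust_eq (c : List String) : pvAdjustOne c = pvPrioritized c := by
  unfold pvAdjustOne pvPrioritized
  have h : (if c.contains "A" then "A" :: ((PySem.List.remove? c "A").getD c) else c)
      = (if c.contains "A" then
          match PySem.List.index? c "A" with
          | some i => "A" :: (PySem.List.slice c none (some (i : Int)) ++ PySem.List.slice c (some ((i : Int) + 1)) none)
          | none => c
        else c) := by
    by_cases hA : c.contains "A" = true
    · rw [if_pos hA, if_pos hA]
      have hmem : "A" ∈ c := by simpa using hA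
      have hsome : ∃ i, PySem.List.index? c "A" = some i := by
        have := (PySem.List.index?_isSome_iff c "A").2 hmem
        exact Option.isSome_iff_exists.1 this
      obtain ⟨i, hi⟩ := hsome
      rw [hi]
      obtain ⟨pre, suf, hc, hlen, hnpre⟩ := (PySem.List.index?_eq_some_iff c "A" i).1 hi
      rw [PySem.List.remove?_eq_some_erase c "A" hmem]
      subst hc hlen
      have he : (pre ++ "A" :: suf).erase "A" = pre ++ suf := by
        rw [List.erase_append_right _ hnpre, List.erase_cons_head]
      have h1 : PySem.List.slice (pre ++ "A" :: suf) none (some ((pre.length : Nat) : Int)) = pre := by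
        rw [PySem.List.slice_to_natCast, List.take_left]
      have h2 : PySem.List.slice (pre ++ "A" :: suf) (some (((pre.length : Nat) : Int) + 1)) none = suf := by
        have : ((pre.length : Nat) : Int) + 1 = ((pre.length + 1 : Nat) : Int) := by push_cast; ring
        rw [this, PySem.List.slice_from_natCast]
        have : pre ++ "A" :: suf = (pre ++ ["A"]) ++ suf := by simp
        rw [this, List.drop_left' (by simp)]
      simp only [Option.getD_some, he, h1, h2]
    · rw [if_neg hA, if_neg hA]
  rw [h]

-- a flatMap of singleton-or-empty is a filterMap
lemma pvFlatMap_eq_filterMap {α β : Type} (l : List α) (p : α → Prop) [DecidablePred p] (f : α → β) :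
    l.flatMap (fun x => if p x then [f x] else []) = l.filterMap (fun x => if p x then some (f x) else none) := by
  induction l with
  | nil => rfl
  | cons a l ih =>
    simp only [List.flatMap_cons, List.filterMap_cons]
    by_cases hp : p a
    · rw [if_pos hp, if_pos hp, ih]; rfl
    · rw [if_neg hp, if_neg hp, ih]; rfl

-- ===== VERDICT (by name: the statement is the Claim_ definition above) =====
theorem build_token_candidates_spec : Claim_equal_build_token_candidates := by
  intro cts ws k _
  unfold Spec_build_token_candidates
  simp only [build_token_candidates, build_token_candidates_alt]
  rw [PySem.List.foldl_congr_mem _ _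
      (fun (acc : List (Int × String × List String)) p => acc ++
        (if PySem.Str.strIsalpha (PySem.Str.strip p.2) = true ∧ PySem.Str.len (PySem.Str.strip p.2) ≤ 6 then
          [(p.1, PySem.Str.strip p.2,
            pvCandidates (ws.foldl (fun d w => d.modify (pvPattern w) [] (fun l => l ++ [w])) PySem.Dict.empty) k (PySem.Str.strip p.2))]
        else [])) _ ?_]
  · rw [PySem.List.foldl_append_eq_flatMap, pvFlatMap_eq_filterMap]
    rfl
  · intro acc p _
    simp only
    set t := PySem.Str.strip p.2 with ht
    have hiff : PySem.Str.strIsalpha t = (!(PySem.Str.len t == 0) && t.toList.all (fun ch => PySem.Chars.isalpha ch)) := by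
      rw [PySem.Str.strIsalpha_eq]
      unfold PySem.Chars.strIsalpha
      rw [PySem.Str.len_eq]
      cases t.toList with
      | nil => simp
      | cons a l =>
        simp
        intro _ _
        omega
    by_cases h0 : (PySem.Str.len t == 0) = true
    · have hnC : ¬ (PySem.Str.strIsalpha t = true ∧ PySem.Str.len t ≤ 6) := by
        rintro ⟨hs, -⟩
        rw [hiff, h0] at hs
        simp at hs
      rw [if_pos h0, if_neg hnC, List.append_nil]
    · rw [if_neg h0]
      by_cases ha : (!(t.toList.all (fun ch => PySem.Chars.isalpha ch))) = true
      · have hnC : ¬ (PySem.Str.strIsalpha t = true ∧ PySem.Str.len t ≤ 6) := by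
          rintro ⟨hs, -⟩
          simp only [Bool.not_eq_true'] at ha
          rw [hiff, ha] at hs
          simp at hs
        rw [if_pos ha, if_neg hnC, List.append_nil]
      · rw [if_neg ha]
        simp only [Bool.not_eq_true] at h0
        simp only [Bool.not_eq_true', Bool.not_eq_false] at ha
        by_cases h6 : PySem.Str.len t ≤ 6
        · have hC : PySem.Str.strIsalpha t = true ∧ PySem.Str.len t ≤ 6 := by
            refine ⟨?_, h6⟩
            rw [hiff, h0, ha]
            rfl
          rw [if_neg (by omega : ¬ PySem.Str.len t > 12), if_pos h6, if_pos hC]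
          have hcand : ws.foldl (fun cs w =>
                if PySem.Str.len w ≠ PySem.Str.len t then cs
                else if word_matches_pattern t w then cs ++ [w] else cs) []
              = (ws.foldl (fun d w => d.modify (pvPattern w) [] (fun l => l ++ [w])) PySem.Dict.empty).getD (pvPattern t) [] := by
            rw [pvCandA_eq, pvFilter_key, pvIndex_getD]
          rw [hcand]
          simp only [pvCandidates]
          rw [pvAdjust_eq]
        · have hnC : ¬ (PySem.Str.strIsalpha t = true ∧ PySem.Str.len t ≤ 6) := fun h => h6 h.2
          by_cases h12 : PySem.Str.len t > 12
          · rw [if_pos h12, if_neg hnC, List.append_nil]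
          · rw [if_neg h12, if_neg h6, if_neg hnC, List.append_nil]
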